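-- pv_equiv track=rewrite | github.com/ed-schwarz/HS_ID | Plot_1_1.py | convert_z_correct
-- ===== SOURCE A (Python) =====
-- def convert_z_correct(z_max):
--     z_r = []
--     for i in range(z_max):
--         if(i == 0):
--             z_r.append(8)
--         elif(i == 1):
--             z_r.append(16)
--         elif(i == 2):
--             z_r.append(32)
--
--     return z_r
-- ===== SOURCE B (Python) =====
-- def convert_z_correct(z_max):
--     return [8, 16, 32][:max(z_max, 0)]
-- ===== Notes on version B (the rewrite author's own statement) =====
-- stated objective: simpler
-- what changed: Replaces the per-index branching loop with a constant list [8,16,32] sliced to max(z_max,0), eliminating the loop entirely.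
import Mathlib
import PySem

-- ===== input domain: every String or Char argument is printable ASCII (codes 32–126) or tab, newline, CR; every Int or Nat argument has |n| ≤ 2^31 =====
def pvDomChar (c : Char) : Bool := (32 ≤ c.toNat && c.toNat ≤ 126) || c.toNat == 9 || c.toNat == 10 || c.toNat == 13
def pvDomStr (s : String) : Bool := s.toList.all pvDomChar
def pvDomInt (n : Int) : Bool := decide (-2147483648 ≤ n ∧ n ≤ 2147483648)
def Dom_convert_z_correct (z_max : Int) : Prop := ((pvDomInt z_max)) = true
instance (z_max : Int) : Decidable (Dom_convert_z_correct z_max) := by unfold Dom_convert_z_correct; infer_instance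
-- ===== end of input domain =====

-- B replaces A's per-index branching loop with the constant list [8,16,32] truncated to max(z_max,0): simpler, no loop.

-- ===== PORT A =====
-- 'for i in range(z_max): if i==0 append 8 elif i==1 append 16 elif i==2 append 32'
def convert_z_correct (z_max : Int) : List Int :=
  (PySem.List.pyRange 0 z_max 1).foldl
    (fun z_r i =>
      if i = 0 then z_r ++ [8]
      else if i = 1 then z_r ++ [16]
      else if i = 2 then z_r ++ [32]
      else z_r) []

-- ===== PORT B =====
-- 'return [8, 16, 32][:max(z_max, 0)]'
def convert_z_correct_alt (z_max : Int) : List Int :=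
  PySem.List.slice [8, 16, 32] none (some (max z_max 0))

-- ===== PRECONDITION & SPEC =====
def Spec_convert_z_correct (z_max : Int) (out : List Int) : Prop := out = convert_z_correct_alt z_max
instance (z_max : Int) (out : List Int) : Decidable (Spec_convert_z_correct z_max out) := by unfold Spec_convert_z_correct; infer_instance

-- ===== CLAIM (what is proved, stated in full; the proofs are below) =====
def Claim_equal_convert_z_correct : Prop := ∀ (z_max : Int), Dom_convert_z_correct z_max → Spec_convert_z_correct z_max (convert_z_correct z_max)

-- ===== LEMMAS AND PROOFS =====

-- A's loop step appends a (possibly empty) block per index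
def pvBlock (i : Int) : List Int :=
  if i = 0 then [8] else if i = 1 then [16] else if i = 2 then [32] else []

theorem pvA_eq_flatMap (z_max : Int) :
    convert_z_correct z_max = (PySem.List.pyRange 0 z_max 1).flatMap pvBlock := by
  unfold convert_z_correct
  rw [show (fun (z_r : List Int) (i : Int) =>
      if i = 0 then z_r ++ [8]
      else if i = 1 then z_r ++ [16]
      else if i = 2 then z_r ++ [32]
      else z_r) = (fun z_r i => z_r ++ pvBlock i) from by
    funext z_r i; unfold pvBlock; split_ifs <;> simp]
  simpa using PySem.List.foldl_append_eq_flatMap pvBlock (PySem.List.pyRange 0 z_max 1) []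

theorem pvFlatMap_tail_nil (n : Int) :
    (PySem.List.pyRange 3 n 1).flatMap pvBlock = [] := by
  rw [List.flatMap_eq_nil_iff]
  intro x hx
  have := (PySem.List.mem_pyRange_one).1 hx
  unfold pvBlock
  split_ifs <;> first | rfl | omega

theorem convert_z_correct_spec : Claim_equal_convert_z_correct := by
  intro z_max _
  unfold Spec_convert_z_correct convert_z_correct_alt
  rw [pvA_eq_flatMap, PySem.List.slice_to _ (le_max_right z_max 0)]
  rcases lt_or_ge z_max 3 with h | h
  · rcases le_or_gt z_max 0 with h0 | h0
    · rw [PySem.List.pyRange_one_eq_nil h0, max_eq_right h0]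
      decide
    · interval_cases z_max <;> decide
  · rw [PySem.List.pyRange_one_append 0 3 z_max (by omega) h, List.flatMap_append,
      pvFlatMap_tail_nil]
    have : (max z_max 0).toNat ≥ 3 := by omega
    rw [List.take_of_length_le (by simp; omega)]
    decide
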